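-- pv_equiv track=rewrite | github.com/thomasahle/konkurrence | fb/chap2/rotary2.py | getMinCodeEntryTime
-- ===== SOURCE A (Python) =====
-- def getMinCodeEntryTime(N, M, C):
--     C = [1] + C
--     M = len(C)
--     dp = [0]*M
--     for i in range(M-2, -1, -1):
--         new = [0]*M
--         for j in range(M):
--             new[j] = min(r(C[i],C[i+1],N) + dp[j],
--                          r(C[j],C[i+1],N) + dp[i])
--         dp = new
--     return dp[0]
--
-- def r(c1, c2, N):
--     return min((c1-c2)%N, (c2-c1)%N)
-- ===== SOURCE B (Python) =====
-- def getMinCodeEntryTime(N, M, C):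
--     P = [1] + C
--     m = len(P)
--     # S[t]: total time if one finger alone dials everything from position t on
--     S = [0] * m
--     for t in range(m - 2, -1, -1):
--         S[t] = r(P[t], P[t + 1], N) + S[t + 1]
--     # h[k] (k >= 1): minimal remaining time when the moving finger has just
--     # arrived at P[k] and the resting finger sits at P[k-1]; we choose the next
--     # index l at which the resting finger jumps in (or never: cost S[k]).
--     h = [0] * m
--     for k in range(m - 1, 0, -1):
--         best = S[k]
--         for l in range(k + 1, m):
--             best = min(best, S[k] - S[l - 1] + r(P[k - 1], P[l], N) + h[l])
--         h[k] = best
--     best = S[0]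
--     for l in range(1, m):
--         best = min(best, S[0] - S[l - 1] + r(P[0], P[l], N) + h[l])
--     return best
--
-- def r(c1, c2, N):
--     return min((c1 - c2) % N, (c2 - c1) % N)
-- ===== Notes on version B (the rewrite author's own statement) =====
-- stated objective: faster
-- what changed: A's backward DP over full rows dp[j] (two r-calls and a fresh length-M row per cell) is replaced by suffix sums of single-finger moves plus a one-index DP h[k] = cost after the resting finger jumps to C[k], minimising over the next jump index; about half the states and a quarter of the modulo work.
import Mathlib
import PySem

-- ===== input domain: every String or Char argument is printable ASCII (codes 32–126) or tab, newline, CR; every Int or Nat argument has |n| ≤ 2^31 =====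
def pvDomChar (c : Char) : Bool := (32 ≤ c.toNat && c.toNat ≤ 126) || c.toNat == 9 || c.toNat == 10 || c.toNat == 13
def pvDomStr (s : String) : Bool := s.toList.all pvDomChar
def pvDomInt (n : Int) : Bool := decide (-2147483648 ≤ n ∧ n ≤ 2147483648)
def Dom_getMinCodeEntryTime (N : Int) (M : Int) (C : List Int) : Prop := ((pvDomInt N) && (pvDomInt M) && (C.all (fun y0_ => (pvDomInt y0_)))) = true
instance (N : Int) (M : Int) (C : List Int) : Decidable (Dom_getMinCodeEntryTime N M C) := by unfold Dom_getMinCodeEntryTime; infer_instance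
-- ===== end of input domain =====

-- B replaces A's backward full-row DP by suffix sums plus a one-index DP over the
-- resting finger's next jump: same O(M^2), but fewer states and fewer modulo operations.


-- ===== PORT A =====
-- helper r(c1, c2, N) = min((c1-c2)%N, (c2-c1)%N), shared by both Pythons
def pyR (c1 c2 N : Int) : Int :=
  min (PySem.Int.mod (c1 - c2) N) (PySem.Int.mod (c2 - c1) N)

def getMinCodeEntryTime (N : Int) (M : Int) (C : List Int) : Int :=
  let C' := 1 :: C
  let M' : Int := (C'.length : Int)
  let dp0 := List.replicate C'.length (0 : Int)
  let dp := (PySem.List.pyRange (M' - 2) (-1) (-1)).foldl (fun dp i =>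
    (PySem.List.pyRange 0 M' 1).map (fun j =>
      min (pyR (PySem.List.pyGetD C' i 0) (PySem.List.pyGetD C' (i + 1) 0) N + PySem.List.pyGetD dp j 0)
          (pyR (PySem.List.pyGetD C' j 0) (PySem.List.pyGetD C' (i + 1) 0) N + PySem.List.pyGetD dp i 0))) dp0
  PySem.List.pyGetD dp 0 0

-- ===== PORT B =====
def getMinCodeEntryTime_alt (N : Int) (M : Int) (C : List Int) : Int :=
  let P := 1 :: C
  let m : Int := (P.length : Int)
  let S0 := List.replicate P.length (0 : Int)
  let S := (PySem.List.pyRange (m - 2) (-1) (-1)).foldl (fun S t =>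
    PySem.List.pySetD S t
      (pyR (PySem.List.pyGetD P t 0) (PySem.List.pyGetD P (t + 1) 0) N + PySem.List.pyGetD S (t + 1) 0)) S0
  let h0 := List.replicate P.length (0 : Int)
  let h := (PySem.List.pyRange (m - 1) 0 (-1)).foldl (fun h k =>
    let best := PySem.List.pyGetD S k 0
    let best := (PySem.List.pyRange (k + 1) m 1).foldl (fun best l =>
      min best (PySem.List.pyGetD S k 0 - PySem.List.pyGetD S (l - 1) 0
                + pyR (PySem.List.pyGetD P (k - 1) 0) (PySem.List.pyGetD P l 0) N
                + PySem.List.pyGetD h l 0)) best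
    PySem.List.pySetD h k best) h0
  let best := PySem.List.pyGetD S 0 0
  (PySem.List.pyRange 1 m 1).foldl (fun best l =>
    min best (PySem.List.pyGetD S 0 0 - PySem.List.pyGetD S (l - 1) 0
              + pyR (PySem.List.pyGetD P 0 0) (PySem.List.pyGetD P l 0) N
              + PySem.List.pyGetD h l 0)) best

-- ===== PRECONDITION & SPEC =====
-- Pre_ excludes only N = 0 with nonempty C: there Python's '%' in r raises ZeroDivisionError.
def Pre_getMinCodeEntryTime (N : Int) (M : Int) (C : List Int) : Prop := N ≠ 0 ∨ C = []
instance (N : Int) (M : Int) (C : List Int) : Decidable (Pre_getMinCodeEntryTime N M C) := by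
  unfold Pre_getMinCodeEntryTime; infer_instance

def pvWitness_getMinCodeEntryTime : Int × Int × List Int := (5, 3, [2, 7, 4])

def Spec_getMinCodeEntryTime (N : Int) (M : Int) (C : List Int) (out : Int) : Prop := out = getMinCodeEntryTime_alt N M C
instance (N : Int) (M : Int) (C : List Int) (out : Int) : Decidable (Spec_getMinCodeEntryTime N M C out) := by unfold Spec_getMinCodeEntryTime; infer_instance

-- ===== CLAIM (what is proved, stated in full; the proofs are below) =====
def Claim_equal_getMinCodeEntryTime : Prop := ∀ (N : Int) (M : Int) (C : List Int), Dom_getMinCodeEntryTime N M C → Pre_getMinCodeEntryTime N M C → Spec_getMinCodeEntryTime N M C (getMinCodeEntryTime N M C)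

-- ===== LEMMAS AND PROOFS =====

-- cost of the single rotation from P[t] to P[t+1]
def aCost (N : Int) (P : List Int) (t : Nat) : Int := pyR (P.getD t 0) (P.getD (t + 1) 0) N

-- suffix sum: time for one finger alone to dial P[i+1..]
def sSum (N : Int) (P : List Int) (i : Nat) : Int :=
  if _h : P.length ≤ i + 1 then 0 else aCost N P i + sSum N P (i + 1)
  termination_by P.length - i
  decreasing_by omega

-- A's DP value: min remaining time with fingers at P[i] and P[j], codes P[i+1..] left
def fB (N : Int) (P : List Int) (i j : Nat) : Int :=
  if _h : P.length ≤ i + 1 then 0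
  else min (aCost N P i + fB N P (i + 1) j)
           (pyR (P.getD j 0) (P.getD (i + 1) 0) N + fB N P (i + 1) i)
  termination_by P.length - i
  decreasing_by all_goals omega

-- B's characterisation: min over the next index l at which the resting finger (value x) jumps
def gUnroll (N : Int) (P : List Int) (i : Nat) (x : Int) : Int :=
  (List.range' (i + 1) (P.length - 1 - i)).foldl (fun best l =>
    min best (sSum N P i - sSum N P (l - 1) + pyR x (P.getD l 0) N + fB N P l (l - 1)))
    (sSum N P i)

lemma sSum_base (N : Int) (P : List Int) (i : Nat) (h : P.length ≤ i + 1) : sSum N P i = 0 := by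
  rw [sSum]; simp [h]

lemma sSum_step (N : Int) (P : List Int) (i : Nat) (h : ¬ P.length ≤ i + 1) :
    sSum N P i = aCost N P i + sSum N P (i + 1) := by
  rw [sSum]; simp [h]

lemma fB_base (N : Int) (P : List Int) (i j : Nat) (h : P.length ≤ i + 1) : fB N P i j = 0 := by
  rw [fB]; simp [h]

lemma foldl_min_add {α : Type} (L : List α) (f : α → Int) (c init : Int) :
    L.foldl (fun b k => min b (c + f k)) (c + init) = c + L.foldl (fun b k => min b (f k)) init := by
  induction L generalizing init with
  | nil => rfl
  | cons a t ih =>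
      simp only [List.foldl_cons]
      rw [min_add_add_left, ih]

lemma foldl_min_min {α : Type} (L : List α) (f : α → Int) (init t : Int) :
    L.foldl (fun b k => min b (f k)) (min init t) = min (L.foldl (fun b k => min b (f k)) init) t := by
  induction L generalizing init with
  | nil => rfl
  | cons a s ih =>
      simp only [List.foldl_cons]
      rw [min_right_comm, ih]

theorem fB_eq_gUnroll (N : Int) (P : List Int) (i j : Nat) :
    fB N P i j = gUnroll N P i (P.getD j 0) := by
  by_cases h : P.length ≤ i + 1
  · rw [fB_base N P i j h]
    unfold gUnroll
    have h0 : P.length - 1 - i = 0 := by omega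
    rw [h0]
    simpa using (sSum_base N P i h).symm
  · have ih1 := fB_eq_gUnroll N P (i + 1) j
    rw [fB, dif_neg h, ih1]
    unfold gUnroll
    have hn : P.length - 1 - i = (P.length - 1 - (i + 1)) + 1 := by omega
    rw [hn, List.range'_succ]
    simp only [List.foldl_cons, Nat.add_sub_cancel]
    rw [sSum_step N P i h]
    have hfun : (fun (b : Int) (l : Nat) => min b
          ((aCost N P i + sSum N P (i + 1)) - sSum N P (l - 1)
            + pyR (P.getD j 0) (P.getD l 0) N + fB N P l (l - 1)))
        = (fun (b : Int) (l : Nat) => min b (aCost N P i + (sSum N P (i + 1) - sSum N P (l - 1)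
            + pyR (P.getD j 0) (P.getD l 0) N + fB N P l (l - 1)))) := by
      funext b l
      congr 1
      ring
    rw [hfun, foldl_min_min, foldl_min_add]
    congr 1
    ring
  termination_by P.length - i
  decreasing_by omega

-- one row step of A's loop
lemma A_step (N : Int) (P : List Int) (i : Nat) (hi : i + 1 < P.length) :
    ((PySem.List.pyRange 0 (P.length : Int) 1).map (fun jj =>
      min (pyR (PySem.List.pyGetD P (i : Int) 0) (PySem.List.pyGetD P ((i : Int) + 1) 0) N
            + PySem.List.pyGetD ((List.range P.length).map (fun j => fB N P (i + 1) j)) jj 0)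
          (pyR (PySem.List.pyGetD P jj 0) (PySem.List.pyGetD P ((i : Int) + 1) 0) N
            + PySem.List.pyGetD ((List.range P.length).map (fun j => fB N P (i + 1) j)) (i : Int) 0)))
    = (List.range P.length).map (fun j => fB N P i j) := by
  rw [PySem.List.pyRange_zero_nat, List.map_map]
  apply List.map_congr_left
  intro j hj
  rw [List.mem_range] at hj
  have hii : ((i : Int)) + 1 = ((i + 1 : Nat) : Int) := by push_cast; ring
  simp only [Function.comp_apply, hii, PySem.List.pyGetD_natCast]
  rw [PySem.List.getD_map_range _ _ _ _ hj,
      PySem.List.getD_map_range _ _ _ _ (by omega : i < P.length)]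
  have hnot : ¬ P.length ≤ i + 1 := by omega
  conv_rhs => rw [fB, dif_neg hnot]
  unfold aCost
  rfl

lemma A_loop (N : Int) (P : List Int) (i : Nat) (hi : i ≤ P.length - 1) :
    (PySem.List.pyRange ((i : Int) - 1) (-1) (-1)).foldl (fun dp ii =>
      (PySem.List.pyRange 0 (P.length : Int) 1).map (fun jj =>
        min (pyR (PySem.List.pyGetD P ii 0) (PySem.List.pyGetD P (ii + 1) 0) N + PySem.List.pyGetD dp jj 0)
            (pyR (PySem.List.pyGetD P jj 0) (PySem.List.pyGetD P (ii + 1) 0) N + PySem.List.pyGetD dp ii 0)))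
      ((List.range P.length).map (fun j => fB N P i j))
    = (List.range P.length).map (fun j => fB N P 0 j) := by
  induction i with
  | zero =>
      rw [show ((0 : Nat) : Int) - 1 = -1 by norm_num,
          PySem.List.pyRange_neg_one_eq_nil (le_refl _)]
      rfl
  | succ i ih =>
      rw [show ((i + 1 : Nat) : Int) - 1 = (i : Int) by push_cast; ring,
          PySem.List.pyRange_neg_one_cons (by omega : (-1 : Int) < (i : Int))]
      simp only [List.foldl_cons]
      rw [A_step N P i (by omega)]
      exact ih (by omega)

theorem portA_eq_fB (N M : Int) (C : List Int) :
    getMinCodeEntryTime N M C = fB N (1 :: C) 0 0 := by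
  simp only [getMinCodeEntryTime]
  have hlen : 1 ≤ (1 :: C).length := by simp
  have hc : ((1 :: C).length : Int) - 2 = (((1 :: C).length - 1 : Nat) : Int) - 1 := by omega
  rw [hc]
  have hrep : List.replicate (1 :: C).length (0 : Int)
      = (List.range (1 :: C).length).map (fun j => fB N (1 :: C) ((1 :: C).length - 1) j) := by
    symm
    calc (List.range (1 :: C).length).map (fun j => fB N (1 :: C) ((1 :: C).length - 1) j)
        = (List.range (1 :: C).length).map (fun _ => (0 : Int)) :=
          List.map_congr_left (by
            intro a ha
            exact fB_base _ _ _ _ (by omega))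
      _ = List.replicate (1 :: C).length (0 : Int) := by
          rw [List.map_const']; simp
  rw [hrep, A_loop N (1 :: C) ((1 :: C).length - 1) (le_refl _)]
  rw [PySem.List.pyGetD_zero]
  exact PySem.List.getD_map_range _ _ _ _ (by simp : 0 < (1 :: C).length)

lemma set_map_range {n i : Nat} (f : Nat → Int) (v : Int) (h : i < n) :
    ((List.range n).map f).set i v = (List.range n).map (fun t => if t = i then v else f t) := by
  apply List.ext_getElem
  · simp
  · intro k hk1 hk2
    simp only [List.getElem_set, List.getElem_map, List.getElem_range]
    rcases eq_or_ne k i with rfl | hne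
    · simp
    · simp [hne, Ne.symm hne]

lemma S_loop (N : Int) (P : List Int) (i : Nat) (hi : i ≤ P.length - 1) :
    (PySem.List.pyRange ((i : Int) - 1) (-1) (-1)).foldl (fun S t =>
      PySem.List.pySetD S t
        (pyR (PySem.List.pyGetD P t 0) (PySem.List.pyGetD P (t + 1) 0) N + PySem.List.pyGetD S (t + 1) 0))
      ((List.range P.length).map (fun t => if i ≤ t then sSum N P t else 0))
    = (List.range P.length).map (sSum N P) := by
  induction i with
  | zero =>
      rw [show ((0 : Nat) : Int) - 1 = -1 by norm_num,
          PySem.List.pyRange_neg_one_eq_nil (le_refl _)]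
      simp
  | succ i ih =>
      have hlt : i + 1 < P.length := by omega
      rw [show ((i + 1 : Nat) : Int) - 1 = (i : Int) by push_cast; ring,
          PySem.List.pyRange_neg_one_cons (by omega : (-1 : Int) < (i : Int))]
      simp only [List.foldl_cons]
      have hii : ((i : Int)) + 1 = ((i + 1 : Nat) : Int) := by push_cast; ring
      rw [hii]
      simp only [PySem.List.pySetD_natCast, PySem.List.pyGetD_natCast]
      have hval : List.getD ((List.range P.length).map (fun t => if i + 1 ≤ t then sSum N P t else 0)) (i + 1) 0 = sSum N P (i + 1) := by
        rw [PySem.List.getD_map_range _ _ _ _ hlt]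
        simp
      rw [hval]
      have hv2 : pyR (List.getD P i 0) (List.getD P (i + 1) 0) N + sSum N P (i + 1) = sSum N P i := by
        rw [sSum_step N P i (by omega)]
        rfl
      rw [hv2]
      rw [set_map_range _ _ (by omega : i < P.length)]
      rw [List.map_congr_left (l := List.range P.length)
        (f := fun t => if t = i then sSum N P i else if i + 1 ≤ t then sSum N P t else 0)
        (g := fun t => if i ≤ t then sSum N P t else 0) (by
        intro t ht
        rcases eq_or_ne t i with rfl | hne
        · simp
        · simp only [if_neg hne]
          split_ifs <;> first | rfl | omega)]
      exact ih (by omega)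

-- the inner minimisation of B equals the unrolled form
lemma inner_fold (N : Int) (P : List Int) (i c : Nat) (x : Int) (hi : i < P.length) (hc : c ≤ i + 1) :
    (PySem.List.pyRange ((i : Int) + 1) ((P.length : Int)) 1).foldl (fun best l =>
      min best (PySem.List.pyGetD ((List.range P.length).map (sSum N P)) (i : Int) 0
                - PySem.List.pyGetD ((List.range P.length).map (sSum N P)) (l - 1) 0
                + pyR x (PySem.List.pyGetD P l 0) N
                + PySem.List.pyGetD ((List.range P.length).map (fun l => if c ≤ l then fB N P l (l - 1) else 0)) l 0))
      (PySem.List.pyGetD ((List.range P.length).map (sSum N P)) (i : Int) 0)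
    = gUnroll N P i x := by
  have hinit : PySem.List.pyGetD ((List.range P.length).map (sSum N P)) (i : Int) 0 = sSum N P i := by
    rw [PySem.List.pyGetD_natCast, PySem.List.getD_map_range _ _ _ _ hi]
  rw [hinit]
  have hii : ((i : Int)) + 1 = ((i + 1 : Nat) : Int) := by push_cast; ring
  rw [hii, PySem.List.pyRange_one]
  have hm : (((P.length : Int)) - ((i + 1 : Nat) : Int)).toNat = P.length - 1 - i := by omega
  rw [hm, List.foldl_map]
  unfold gUnroll
  rw [List.range'_eq_map_range, List.foldl_map]
  apply PySem.List.foldl_congr_mem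
  intro acc k hk
  rw [List.mem_range] at hk
  have e1 : ((i + 1 : Nat) : Int) + (k : Int) = ((i + 1 + k : Nat) : Int) := by push_cast; ring
  have e2 : ((i + 1 + k : Nat) : Int) - 1 = ((i + k : Nat) : Int) := by push_cast; ring
  rw [e1, e2]
  simp only [PySem.List.pyGetD_natCast]
  have e3 : i + 1 + k - 1 = i + k := by omega
  have hval : List.getD ((List.range P.length).map (fun l => if c ≤ l then fB N P l (l - 1) else 0)) (i + 1 + k) 0 = fB N P (i + 1 + k) (i + k) := by
    rw [PySem.List.getD_map_range _ _ _ _ (by omega : i + 1 + k < P.length)]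
    have hcle : c ≤ i + 1 + k := by omega
    simp [hcle, e3]
  rw [hval,
      PySem.List.getD_map_range _ _ _ _ (by omega : i + k < P.length)]
  simp only [e3]

lemma H_loop (N : Int) (P : List Int) (i : Nat) (h1 : 1 ≤ i) (hi : i ≤ P.length) :
    (PySem.List.pyRange ((i : Int) - 1) 0 (-1)).foldl (fun hh k =>
      PySem.List.pySetD hh k
        ((PySem.List.pyRange (k + 1) ((P.length : Int)) 1).foldl (fun best l =>
          min best (PySem.List.pyGetD ((List.range P.length).map (sSum N P)) k 0
                    - PySem.List.pyGetD ((List.range P.length).map (sSum N P)) (l - 1) 0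
                    + pyR (PySem.List.pyGetD P (k - 1) 0) (PySem.List.pyGetD P l 0) N
                    + PySem.List.pyGetD hh l 0))
          (PySem.List.pyGetD ((List.range P.length).map (sSum N P)) k 0)))
      ((List.range P.length).map (fun l => if i ≤ l then fB N P l (l - 1) else 0))
    = (List.range P.length).map (fun l => if 1 ≤ l then fB N P l (l - 1) else 0) := by
  induction i with
  | zero => exact absurd h1 (by norm_num)
  | succ i ih =>
      rcases Nat.eq_zero_or_pos i with rfl | hpos
      · rw [show ((0 + 1 : Nat) : Int) - 1 = 0 by norm_num,
            PySem.List.pyRange_neg_one_eq_nil (le_refl 0)]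
        norm_num
      · have hlt : i < P.length := by omega
        rw [show ((i + 1 : Nat) : Int) - 1 = (i : Int) by push_cast; ring,
            PySem.List.pyRange_neg_one_cons (by omega : (0 : Int) < (i : Int))]
        simp only [List.foldl_cons]
        rw [show PySem.List.pyGetD P ((i : Int) - 1) 0 = P.getD (i - 1) 0 by
          rw [show ((i : Nat) : Int) - 1 = ((i - 1 : Nat) : Int) by omega, PySem.List.pyGetD_natCast]]
        rw [inner_fold N P i (i + 1) (P.getD (i - 1) 0) hlt (by omega)]
        rw [← fB_eq_gUnroll N P i (i - 1)]
        rw [PySem.List.pySetD_natCast]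
        rw [set_map_range _ _ hlt]
        rw [List.map_congr_left (l := List.range P.length)
          (f := fun t => if t = i then fB N P i (i - 1) else if i + 1 ≤ t then fB N P t (t - 1) else 0)
          (g := fun l => if i ≤ l then fB N P l (l - 1) else 0) (by
          intro t ht
          rcases eq_or_ne t i with rfl | hne
          · simp
          · simp only [if_neg hne]
            split_ifs <;> first | rfl | omega)]
        exact ih (by omega) (by omega)

lemma S_full (N : Int) (P : List Int) (hP : 1 ≤ P.length) :
    (PySem.List.pyRange ((P.length : Int) - 2) (-1) (-1)).foldl (fun S t =>
      PySem.List.pySetD S t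
        (pyR (PySem.List.pyGetD P t 0) (PySem.List.pyGetD P (t + 1) 0) N + PySem.List.pyGetD S (t + 1) 0))
      (List.replicate P.length (0 : Int))
    = (List.range P.length).map (sSum N P) := by
  have hc : ((P.length : Int)) - 2 = ((P.length - 1 : Nat) : Int) - 1 := by omega
  rw [hc]
  have hrep : List.replicate P.length (0 : Int)
      = (List.range P.length).map (fun t => if P.length - 1 ≤ t then sSum N P t else 0) := by
    symm
    calc (List.range P.length).map (fun t => if P.length - 1 ≤ t then sSum N P t else 0)
        = (List.range P.length).map (fun _ => (0 : Int)) := List.map_congr_left (by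
          intro t ht
          rw [List.mem_range] at ht
          split_ifs with hcond
          · exact sSum_base N P t (by omega)
          · rfl)
      _ = List.replicate P.length (0 : Int) := by rw [List.map_const']; simp
  rw [hrep]
  exact S_loop N P (P.length - 1) (le_refl _)

lemma H_full (N : Int) (P : List Int) (hP : 1 ≤ P.length) :
    (PySem.List.pyRange ((P.length : Int) - 1) 0 (-1)).foldl (fun hh k =>
      PySem.List.pySetD hh k
        ((PySem.List.pyRange (k + 1) ((P.length : Int)) 1).foldl (fun best l =>
          min best (PySem.List.pyGetD ((List.range P.length).map (sSum N P)) k 0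
                    - PySem.List.pyGetD ((List.range P.length).map (sSum N P)) (l - 1) 0
                    + pyR (PySem.List.pyGetD P (k - 1) 0) (PySem.List.pyGetD P l 0) N
                    + PySem.List.pyGetD hh l 0))
          (PySem.List.pyGetD ((List.range P.length).map (sSum N P)) k 0)))
      (List.replicate P.length (0 : Int))
    = (List.range P.length).map (fun l => if 1 ≤ l then fB N P l (l - 1) else 0) := by
  have hrep : List.replicate P.length (0 : Int)
      = (List.range P.length).map (fun l => if P.length ≤ l then fB N P l (l - 1) else 0) := by
    symm
    calc (List.range P.length).map (fun l => if P.length ≤ l then fB N P l (l - 1) else 0)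
        = (List.range P.length).map (fun _ => (0 : Int)) := List.map_congr_left (by
          intro t ht
          rw [List.mem_range] at ht
          rw [if_neg (by omega)])
      _ = List.replicate P.length (0 : Int) := by rw [List.map_const']; simp
  rw [hrep]
  exact H_loop N P P.length hP (le_refl _)

lemma final_fold (N : Int) (P : List Int) (hP : 1 ≤ P.length) :
    (PySem.List.pyRange 1 ((P.length : Int)) 1).foldl (fun best l =>
      min best (PySem.List.pyGetD ((List.range P.length).map (sSum N P)) 0 0
                - PySem.List.pyGetD ((List.range P.length).map (sSum N P)) (l - 1) 0
                + pyR (PySem.List.pyGetD P 0 0) (PySem.List.pyGetD P l 0) N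
                + PySem.List.pyGetD ((List.range P.length).map (fun l => if 1 ≤ l then fB N P l (l - 1) else 0)) l 0))
      (PySem.List.pyGetD ((List.range P.length).map (sSum N P)) 0 0)
    = fB N P 0 0 := by
  have h := inner_fold N P 0 1 (PySem.List.pyGetD P 0 0) (by omega) (le_refl _)
  rw [fB_eq_gUnroll N P 0 0]
  simpa [PySem.List.pyGetD_zero] using h

theorem portB_eq_fB (N M : Int) (C : List Int) :
    getMinCodeEntryTime_alt N M C = fB N (1 :: C) 0 0 := by
  simp only [getMinCodeEntryTime_alt]
  rw [S_full N (1 :: C) (by simp), H_full N (1 :: C) (by simp), final_fold N (1 :: C) (by simp)]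

-- ===== VERDICT (by name: the statement is the Claim_ definition above) =====
theorem getMinCodeEntryTime_spec : Claim_equal_getMinCodeEntryTime := by
  intro N M C _ _
  unfold Spec_getMinCodeEntryTime
  rw [portA_eq_fB, portB_eq_fB]
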